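-- pv_equiv track=rewrite | github.com/TomWildenhain/pptcc | pptutils.py | uint_to_dword
-- ===== SOURCE A (Python) =====
-- def uint_to_dword(x):
--     res = ''
--     for i in range(32):
--         if x % 2 == 1:
--             res = '1' + res
--         else:
--             res = '0' + res
--         x = x // 2
--     return res[:16], res[16:]
-- ===== SOURCE B (Python) =====
-- def uint_to_dword(x):
--     def bits16(n):
--         return ''.join('1' if (n >> (15 - k)) & 1 else '0' for k in range(16))
--     return bits16(x >> 16), bits16(x)
-- ===== Notes on version B (the rewrite author's own statement) =====
-- stated objective: simpler
-- what changed: Replaces the prepend-and-halve loop (build the whole binary string by repeated floor division, then slice it in two) with closed-form per-bit extraction: each half word is produced directly by shifting and masking, with no accumulating string, no mutated division state and no slicing.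
import Mathlib
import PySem

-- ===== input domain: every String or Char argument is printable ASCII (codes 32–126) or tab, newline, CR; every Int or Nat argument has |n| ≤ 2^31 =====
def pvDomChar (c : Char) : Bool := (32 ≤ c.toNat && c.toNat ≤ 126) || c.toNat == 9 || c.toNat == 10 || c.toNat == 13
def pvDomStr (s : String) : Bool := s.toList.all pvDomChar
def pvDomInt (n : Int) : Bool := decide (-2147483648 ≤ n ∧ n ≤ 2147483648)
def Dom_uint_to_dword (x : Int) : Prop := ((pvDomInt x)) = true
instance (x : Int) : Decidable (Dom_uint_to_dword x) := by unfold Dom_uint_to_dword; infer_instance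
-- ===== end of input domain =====

-- B extracts each half word's bits in closed form by shift-and-mask instead of A's halve/prepend loop plus slicing; objective: simpler.

-- ===== PORT A =====
-- res is modelled as the list of characters of the accumulating string; '1' + res is a cons onto that list.
def uint_to_dword (x : Int) : String × String :=
  let st := (List.range 32).foldl (fun (s : List Char × Int) _ =>
      ((if PySem.Int.mod s.2 2 = 1 then '1' :: s.1 else '0' :: s.1), PySem.Int.floordiv s.2 2))
    ([], x)
  (String.mk (PySem.List.slice st.1 none (some 16)),
   String.mk (PySem.List.slice st.1 (some 16) none))

-- ===== PORT B =====
-- ''.join('1' if (n >> (15 - k)) & 1 else '0' for k in range(16))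
def pvBits16 (n : Int) : String :=
  String.mk ((List.range 16).map (fun (k : Nat) =>
    if PySem.Int.band (n >>> (15 - k)) 1 ≠ 0 then '1' else '0'))

def uint_to_dword_alt (x : Int) : String × String :=
  (pvBits16 (x >>> (16:Nat)), pvBits16 x)

-- ===== PRECONDITION & SPEC =====
def Spec_uint_to_dword (x : Int) (out : String × String) : Prop := out = uint_to_dword_alt x
instance (x : Int) (out : String × String) : Decidable (Spec_uint_to_dword x out) := by unfold Spec_uint_to_dword; infer_instance

-- ===== CLAIM (what is proved, stated in full; the proofs are below) =====
def Claim_equal_uint_to_dword : Prop := ∀ (x : Int), Dom_uint_to_dword x → Spec_uint_to_dword x (uint_to_dword x)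

-- ===== LEMMAS AND PROOFS =====

theorem pv_shift_succ (x : Int) (i : Nat) : PySem.Int.floordiv (x >>> i) 2 = x >>> (i+1) := by
  rw [PySem.Int.floordiv_eq_ediv_of_pos (by norm_num)]
  simp only [Int.shiftRight_eq_div_pow]
  push_cast
  rw [pow_succ, Int.ediv_ediv_of_nonneg (by positivity)]

theorem pv_shift_add (x : Int) (i j : Nat) : (x >>> i) >>> j = x >>> (i+j) := by
  simp only [Int.shiftRight_eq_div_pow]
  push_cast
  rw [pow_add, Int.ediv_ediv_of_nonneg (by positivity)]

-- the bit character A's loop produces at step i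
def pvBitA (x : Int) (i : Nat) : Char :=
  if PySem.Int.mod (x >>> i) 2 = 1 then '1' else '0'

theorem pv_loop (x : Int) (n : Nat) :
    (List.range n).foldl (fun (s : List Char × Int) _ =>
      ((if PySem.Int.mod s.2 2 = 1 then '1' :: s.1 else '0' :: s.1), PySem.Int.floordiv s.2 2))
      ([], x)
    = (((List.range n).map (pvBitA x)).reverse, x >>> n) := by
  induction n with
  | zero => simp
  | succ n ih =>
      rw [List.range_succ, List.foldl_append, ih]
      simp only [List.foldl_cons, List.foldl_nil, List.map_append, List.reverse_append]
      refine Prod.ext ?_ (pv_shift_succ x n)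
      simp only [List.map_cons, List.map_nil, List.reverse_cons, List.reverse_nil,
        List.nil_append, List.singleton_append, pvBitA]
      split_ifs <;> rfl

theorem pv_bit_eq (x : Int) (i : Nat) :
    (if PySem.Int.band (x >>> i) 1 ≠ 0 then '1' else '0') = pvBitA x i := by
  unfold pvBitA
  rw [PySem.Int.band_one, PySem.Int.mod_eq_emod_of_pos (by norm_num)]
  generalize (x >>> i) = y
  rcases Int.emod_two_eq y with h | h <;> rw [h] <;> norm_num

-- ===== VERDICT (by name: the statement is the Claim_ definition above) =====
theorem uint_to_dword_spec : Claim_equal_uint_to_dword := by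
  intro x _
  simp only [Spec_uint_to_dword, uint_to_dword, uint_to_dword_alt, pvBits16, pv_loop]
  rw [PySem.List.slice_to _ (by norm_num), PySem.List.slice_from _ (by norm_num)]
  rw [show ((16:Int)).toNat = 16 from rfl]
  refine Prod.ext (congrArg String.mk ?_) (congrArg String.mk ?_)
  · apply List.ext_getElem
    · simp
    · intro k hk _
      have hk' : k < 16 := by simpa using hk
      simp only [List.getElem_take, List.getElem_reverse, List.getElem_map,
        List.getElem_range, List.length_map, List.length_range]
      rw [pv_shift_add]
      have e : 16 + (15 - k) = 32 - 1 - k := by omega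
      rw [e, pv_bit_eq]
  · apply List.ext_getElem
    · simp
    · intro k hk _
      have hk' : k < 16 := by simpa using hk
      simp only [List.getElem_drop, List.getElem_reverse, List.getElem_map,
        List.getElem_range, List.length_map, List.length_range]
      have e : 15 - k = 32 - 1 - (16 + k) := by omega
      rw [e, pv_bit_eq]
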